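-- pv_equiv track=rewrite | github.com/daniel-reich/ubiquitous-fiesta | QdEAMeXNJAivcTMiT_2.py | boxes
-- ===== SOURCE A (Python) =====
-- def boxes(weights):
--   boxes = 0
--   while True:
--     current = 0
--     if sum(weights) <= 10:
--       return boxes + 1
--     while True:
--       if current + weights[0] > 10:
--         boxes += 1
--         break
--       elif current + weights[0] == 10:
--         boxes += 1
--         weights.pop(0)
--         break
--       else:
--         current += weights[0]
--         weights.pop(0)
-- ===== SOURCE B (Python) =====
-- def boxes(weights):
--     remaining = sum(weights)
--     if remaining <= 10:
--         return 1
--     count = 0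
--     load = 0
--     for w in weights:
--         if load + w > 10:
--             count += 1
--             if remaining <= 10:
--                 return count + 1
--             if w == 10:
--                 count += 1
--                 remaining -= w
--                 if remaining <= 10:
--                     return count + 1
--                 load = 0
--             else:
--                 load = w
--                 remaining -= w
--         elif load + w == 10:
--             count += 1
--             remaining -= w
--             if remaining <= 10:
--                 return count + 1
--             load = 0
--         else:
--             load += w
--             remaining -= w
--     return count + 1
-- ===== Notes on version B (the rewrite author's own statement) =====
-- stated objective: alternative
-- what changed: A repeatedly recomputes sum(weights) and uses pop(0) in nested while-loops; B makes a single linear pass keeping a running box load and a running remaining-suffix sum, so the list is traversed once and never mutated.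
-- outside the precondition, e.g. on boxes([-5, 12, 5]): A returns 2, B returns 2
import Mathlib
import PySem

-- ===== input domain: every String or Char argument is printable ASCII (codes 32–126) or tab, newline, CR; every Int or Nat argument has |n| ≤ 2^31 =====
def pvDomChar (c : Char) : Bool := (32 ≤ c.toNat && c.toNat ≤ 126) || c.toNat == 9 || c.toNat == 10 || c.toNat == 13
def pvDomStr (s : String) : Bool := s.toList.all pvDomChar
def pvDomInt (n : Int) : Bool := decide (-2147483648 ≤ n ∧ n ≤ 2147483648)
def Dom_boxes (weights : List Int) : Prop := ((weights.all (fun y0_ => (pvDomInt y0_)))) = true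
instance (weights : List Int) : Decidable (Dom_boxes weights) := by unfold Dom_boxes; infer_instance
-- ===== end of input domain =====

-- B replaces A's nested while-loops (which recompute sum(weights) and pop(0) on every round)
-- with one linear pass keeping a running box load and remaining-suffix sum; the equivalence is
-- about the RETURN value only (Python A mutates its argument via pop(0), B does not).

-- ===== PORT A =====
-- inner `while True` loop of A: state (boxes, current, weights); returns the updated
-- (boxes, weights) at `break`, or none where Python's weights[0] raises IndexError.
def boxesInner : Int → Int → List Int → Option (Int × List Int)
  | _, _, [] => none
  | boxes, current, w :: rest =>
    if current + w > 10 then some (boxes + 1, w :: rest)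
    else if current + w = 10 then some (boxes + 1, rest)
    else boxesInner boxes (current + w) rest

-- outer `while True` loop of A, fuelled (Python A does not terminate on every input;
-- Pre_boxes restricts to inputs on which length+1 rounds provably suffice).
def boxesOuter : Nat → Int → List Int → Option Int
  | 0, _, _ => none
  | f + 1, boxes, ws =>
    if ws.sum ≤ 10 then some (boxes + 1)
    else
      match boxesInner boxes 0 ws with
      | none => none
      | some (b, ws') => boxesOuter f b ws'

def boxes (weights : List Int) : Int :=
  (boxesOuter (weights.length + 1) 0 weights).getD 0

-- ===== PORT B =====
-- the single `for w in weights` loop of Source B, state (count, load, remaining)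
def boxesAltLoop : Int → Int → Int → List Int → Int
  | count, _, _, [] => count + 1
  | count, load, remaining, w :: rest =>
    if load + w > 10 then
      if remaining ≤ 10 then (count + 1) + 1
      else if w = 10 then
        if remaining - w ≤ 10 then (count + 2) + 1
        else boxesAltLoop (count + 2) 0 (remaining - w) rest
      else boxesAltLoop (count + 1) w (remaining - w) rest
    else if load + w = 10 then
      if remaining - w ≤ 10 then (count + 1) + 1
      else boxesAltLoop (count + 1) 0 (remaining - w) rest
    else boxesAltLoop count (load + w) (remaining - w) rest

def boxes_alt (weights : List Int) : Int :=
  let remaining := weights.sum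
  if remaining ≤ 10 then 1 else boxesAltLoop 0 0 remaining weights

-- ===== PRECONDITION & SPEC =====
-- Pre_ excludes lists whose total exceeds 10 and that contain an element greater than 10:
-- on those A loops forever whenever such an element surfaces at the start of a box (it
-- returns on only a few of them, via preceding negative weights cancelling the big element).
def Pre_boxes (weights : List Int) : Prop :=
  weights.sum ≤ 10 ∨ ∀ w ∈ weights, w ≤ 10
instance (weights : List Int) : Decidable (Pre_boxes weights) := by
  unfold Pre_boxes; infer_instance

def pvWitness_boxes : List Int := [3, 9, 2, 10, 7, 4]

def Spec_boxes (weights : List Int) (out : Int) : Prop := out = boxes_alt weights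
instance (weights : List Int) (out : Int) : Decidable (Spec_boxes weights out) := by
  unfold Spec_boxes; infer_instance

-- ===== CLAIM (what is proved, stated in full; the proofs are below) =====
def Claim_equal_boxes : Prop :=
  ∀ (weights : List Int), Dom_boxes weights → Pre_boxes weights → Spec_boxes weights (boxes weights)

-- ===== LEMMAS AND PROOFS =====

-- unfold exactly one round of A's outer loop
lemma outer_step (f : Nat) (b : Int) (ws : List Int) :
    boxesOuter (f + 1) b ws =
      if ws.sum ≤ 10 then some (b + 1)
      else
        match boxesInner b 0 ws with
        | none => none
        | some (b', ws') => boxesOuter f b' ws' := rfl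

-- more fuel never changes a result the outer loop already produced
lemma boxesOuter_mono : ∀ (f f' : Nat) (b : Int) (ws : List Int) (r : Int),
    boxesOuter f b ws = some r → f ≤ f' → boxesOuter f' b ws = some r := by
  intro f
  induction f with
  | zero => intro f' b ws r h; simp [boxesOuter] at h
  | succ f ih =>
    intro f' b ws r h hle
    obtain ⟨f'', rfl⟩ : ∃ f'', f' = f'' + 1 := ⟨f' - 1, by omega⟩
    rw [outer_step] at h ⊢
    by_cases hs : ws.sum ≤ 10
    · rw [if_pos hs] at h ⊢; exact h
    · rw [if_neg hs] at h ⊢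
      cases hin : boxesInner b 0 ws with
      | none => rw [hin] at h; simp at h
      | some p =>
        obtain ⟨b', ws'⟩ := p
        rw [hin] at h
        exact ih f'' b' ws' r h (by omega)

-- the inner loop never lengthens the list
lemma boxesInner_len_le : ∀ (ws : List Int) (boxes current b : Int) (ws' : List Int),
    boxesInner boxes current ws = some (b, ws') → ws'.length ≤ ws.length := by
  intro ws
  induction ws with
  | nil => intro boxes current b ws' h; simp [boxesInner] at h
  | cons w rest ih =>
    intro boxes current b ws' h
    simp only [boxesInner] at h
    split_ifs at h with h1 h2
    · cases h; simp
    · cases h; simp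
    · exact Nat.le_trans (ih _ _ _ _ h) (by simp)

-- started at a fresh box (current = 0) on a head ≤ 10, the inner loop strictly shrinks the list
lemma boxesInner_len_lt : ∀ (w : Int) (rest : List Int) (boxes b : Int) (ws' : List Int),
    w ≤ 10 → boxesInner boxes 0 (w :: rest) = some (b, ws') → ws'.length ≤ rest.length := by
  intro w rest boxes b ws' hw h
  simp only [boxesInner] at h
  split_ifs at h with h1 h2
  · omega
  · cases h; simp
  · exact boxesInner_len_le rest _ _ _ _ h

-- main simulation: a mid-inner-loop state of A (open-box load `current`, unpopped list `ws`,
-- count `boxes`) against B's loop on the same unprocessed suffix, with remaining = ws.sum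
lemma main_sim : ∀ (ws : List Int) (current boxes : Int),
    (∀ w ∈ ws, w ≤ 10) → 10 < current + ws.sum → current < 10 →
    (match boxesInner boxes current ws with
     | none => none
     | some (b, ws') => boxesOuter (ws'.length + 1) b ws')
      = some (boxesAltLoop boxes current ws.sum ws) := by
  intro ws
  induction ws with
  | nil => intro current boxes _ hsum hcur; simp at hsum; omega
  | cons w rest ih =>
    intro current boxes hall hsum hcur
    have hw : w ≤ 10 := hall w (by simp)
    have hrest : ∀ x ∈ rest, x ≤ 10 := fun x hx => hall x (by simp [hx])
    have e : (w :: rest).sum = w + rest.sum := by simp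
    by_cases h1 : current + w > 10
    · have hredI : boxesInner boxes current (w :: rest) = some (boxes + 1, w :: rest) := by
        simp [boxesInner, h1]
      simp only [hredI, List.length_cons]
      rw [outer_step]
      by_cases hs : (w :: rest).sum ≤ 10
      · rw [if_pos hs]
        have halt : boxesAltLoop boxes current (w :: rest).sum (w :: rest) = (boxes + 1) + 1 := by
          simp only [boxesAltLoop]
          rw [if_pos h1, if_pos hs]
        rw [halt]
      · rw [if_neg hs]
        have hsgt : 10 < w + rest.sum := by rw [e] at hs; omega
        by_cases h10 : w = 10
        · subst h10
          have hredI2 : boxesInner (boxes + 1) 0 (10 :: rest) = some (boxes + 1 + 1, rest) := by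
            norm_num [boxesInner]
          simp only [hredI2]
          rw [outer_step]
          by_cases hrs : rest.sum ≤ 10
          · rw [if_pos hrs]
            have halt : boxesAltLoop boxes current (10 :: rest).sum (10 :: rest)
                = (boxes + 2) + 1 := by
              simp only [boxesAltLoop]
              rw [if_pos h1, if_neg hs, if_pos trivial,
                if_pos (show (10 :: rest).sum - 10 ≤ 10 by rw [e]; omega)]
            rw [halt]
            simp only [Option.some.injEq]; ring
          · rw [if_neg hrs]
            have halt : boxesAltLoop boxes current (10 :: rest).sum (10 :: rest)
                = boxesAltLoop (boxes + 1 + 1) 0 rest.sum rest := by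
              simp only [boxesAltLoop]
              rw [if_pos h1, if_neg hs, if_pos trivial,
                if_neg (show ¬ (10 :: rest).sum - 10 ≤ 10 by rw [e]; omega),
                show (10 :: rest).sum - 10 = rest.sum by rw [e]; ring,
                show (boxes : Int) + 2 = boxes + 1 + 1 by ring]
            rw [halt]
            have ihp := ih 0 (boxes + 1 + 1) hrest (by omega) (by norm_num)
            cases hin : boxesInner (boxes + 1 + 1) 0 rest with
            | none => rw [hin] at ihp; simp at ihp
            | some p =>
              obtain ⟨b', ws'⟩ := p
              rw [hin] at ihp
              have hne : rest ≠ [] := by intro hnil; rw [hnil] at hrs; simp at hrs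
              obtain ⟨w', rest', rfl⟩ := List.exists_cons_of_ne_nil hne
              have hlen : ws'.length + 1 ≤ (w' :: rest').length := by
                have := boxesInner_len_lt w' rest' (boxes + 1 + 1) b' ws'
                  (hrest w' (by simp)) hin
                simp; omega
              exact boxesOuter_mono _ ((w' :: rest').length) _ _ _ ihp hlen
        · have hwlt : w < 10 := lt_of_le_of_ne hw h10
          have hredI2 : boxesInner (boxes + 1) 0 (w :: rest)
              = boxesInner (boxes + 1) (0 + w) rest := by
            simp only [boxesInner, if_neg (by omega : ¬ ((0:Int) + w > 10)),
              if_neg (by omega : ¬ ((0:Int) + w = 10))]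
          simp only [hredI2]
          have halt : boxesAltLoop boxes current (w :: rest).sum (w :: rest)
              = boxesAltLoop (boxes + 1) (0 + w) rest.sum rest := by
            simp only [boxesAltLoop]
            rw [if_pos h1, if_neg hs, if_neg h10,
              show (w :: rest).sum - w = rest.sum by rw [e]; ring, zero_add]
          rw [halt]
          have ihp := ih (0 + w) (boxes + 1) hrest (by omega) (by omega)
          cases hin : boxesInner (boxes + 1) (0 + w) rest with
          | none => rw [hin] at ihp; simp at ihp
          | some p =>
            obtain ⟨b', ws'⟩ := p
            rw [hin] at ihp
            have hlen : ws'.length + 1 ≤ rest.length + 1 := by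
              have := boxesInner_len_le rest (boxes + 1) (0 + w) b' ws' hin
              omega
            exact boxesOuter_mono _ _ _ _ _ ihp hlen
    · by_cases h2 : current + w = 10
      · have hredI : boxesInner boxes current (w :: rest) = some (boxes + 1, rest) := by
          simp [boxesInner, h2]
        simp only [hredI]
        rw [outer_step]
        by_cases hrs : rest.sum ≤ 10
        · rw [if_pos hrs]
          have halt : boxesAltLoop boxes current (w :: rest).sum (w :: rest)
              = (boxes + 1) + 1 := by
            simp only [boxesAltLoop]
            rw [if_neg h1, if_pos h2, if_pos (show (w :: rest).sum - w ≤ 10 by rw [e]; omega)]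
          rw [halt]
        · rw [if_neg hrs]
          have halt : boxesAltLoop boxes current (w :: rest).sum (w :: rest)
              = boxesAltLoop (boxes + 1) 0 rest.sum rest := by
            simp only [boxesAltLoop]
            rw [if_neg h1, if_pos h2, if_neg (show ¬ (w :: rest).sum - w ≤ 10 by rw [e]; omega),
              show (w :: rest).sum - w = rest.sum by rw [e]; ring]
          rw [halt]
          have ihp := ih 0 (boxes + 1) hrest (by omega) (by norm_num)
          cases hin : boxesInner (boxes + 1) 0 rest with
          | none => rw [hin] at ihp; simp at ihp
          | some p =>
            obtain ⟨b', ws'⟩ := p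
            rw [hin] at ihp
            have hne : rest ≠ [] := by intro hnil; rw [hnil] at hrs; simp at hrs
            obtain ⟨w', rest', rfl⟩ := List.exists_cons_of_ne_nil hne
            have hlen : ws'.length + 1 ≤ (w' :: rest').length := by
              have := boxesInner_len_lt w' rest' (boxes + 1) b' ws'
                (hrest w' (by simp)) hin
              simp; omega
            exact boxesOuter_mono _ _ _ _ _ ihp hlen
      · have h3 : current + w < 10 := by omega
        have hredI : boxesInner boxes current (w :: rest)
            = boxesInner boxes (current + w) rest := by
          simp only [boxesInner, if_neg h1, if_neg h2]
        simp only [hredI]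
        have halt : boxesAltLoop boxes current (w :: rest).sum (w :: rest)
            = boxesAltLoop boxes (current + w) rest.sum rest := by
          simp only [boxesAltLoop]
          rw [if_neg h1, if_neg h2, show (w :: rest).sum - w = rest.sum by rw [e]; ring]
        rw [halt]
        exact ih (current + w) boxes hrest (by rw [e] at hsum; omega) h3

-- ===== VERDICT (by name: the statement is the Claim_ definition above) =====
theorem boxes_spec : Claim_equal_boxes := by
  unfold Claim_equal_boxes
  intro ws _ hpre
  unfold Spec_boxes boxes boxes_alt
  by_cases hsum : ws.sum ≤ 10
  · rw [outer_step, if_pos hsum]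
    simp [hsum]
  · have hall : ∀ w ∈ ws, w ≤ 10 := by
      cases hpre with
      | inl h => exact absurd h hsum
      | inr h => exact h
    have hgt : 10 < ws.sum := by omega
    have hne : ws ≠ [] := by intro hnil; rw [hnil] at hgt; simp at hgt
    obtain ⟨w, rest, rfl⟩ := List.exists_cons_of_ne_nil hne
    have hrun : boxesOuter ((w :: rest).length + 1) 0 (w :: rest)
        = some (boxesAltLoop 0 0 (w :: rest).sum (w :: rest)) := by
      rw [outer_step, if_neg hsum]
      have hsim := main_sim (w :: rest) 0 0 hall (by omega) (by norm_num)
      cases hin : boxesInner 0 0 (w :: rest) with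
      | none => rw [hin] at hsim; simp at hsim
      | some p =>
        obtain ⟨b', ws'⟩ := p
        rw [hin] at hsim
        have hlen : ws'.length + 1 ≤ (w :: rest).length := by
          have := boxesInner_len_lt w rest 0 b' ws' (hall w (by simp)) hin
          simp; omega
        exact boxesOuter_mono _ _ _ _ _ hsim hlen
    rw [hrun]
    simp only [Option.getD_some]
    rw [if_neg hsum]
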